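-- pv_equiv track=rewrite | github.com/mkovy39/CyberSec-Concordia-Projects | INSE6110 Project - RSA/Test codes/encryption_test.py | hexadecimal_conversion
-- ===== SOURCE A (Python) =====
-- def hexadecimal_conversion(m):
--     chunk_length = 3
--     small_chunks = []
--     hex_values = []
--
--     for x in range(0, len(m), chunk_length):
--         chunk = m[x:x + chunk_length]
--         small_chunks.append(chunk)
--
--     hex_texts = []
--
--     for chunk in small_chunks:
--         hex_text = ''
--         hexa_values = []
--
--         for char in chunk:
--             hex_decimal_value = hex(ord(char))[2:]
--             hex_text += hex_decimal_value
--             hexa_values.append(hex_decimal_value)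
--
--         hex_values.append(hexa_values)
--         hex_texts.append(hex_text)
--
--     return small_chunks, hex_values, hex_texts
-- ===== SOURCE B (Python) =====
-- def hexadecimal_conversion(m):
--     hexes = [hex(ord(c))[2:] for c in m]
--     small_chunks = []
--     hex_values = []
--     hex_texts = []
--     for x in range(0, len(m), 3):
--         small_chunks.append(m[x:x + 3])
--         h = hexes[x:x + 3]
--         hex_values.append(h)
--         hex_texts.append(''.join(h))
--     return small_chunks, hex_values, hex_texts
-- ===== Notes on version B (the rewrite author's own statement) =====
-- stated objective: alternative
-- what changed: B converts every character to hex in one flat pass first, then a single loop slices the string and the precomputed hex list in parallel, replacing A's chunk-then-convert two-pass structure with nested per-chunk loops and string concatenation.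
import Mathlib
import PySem

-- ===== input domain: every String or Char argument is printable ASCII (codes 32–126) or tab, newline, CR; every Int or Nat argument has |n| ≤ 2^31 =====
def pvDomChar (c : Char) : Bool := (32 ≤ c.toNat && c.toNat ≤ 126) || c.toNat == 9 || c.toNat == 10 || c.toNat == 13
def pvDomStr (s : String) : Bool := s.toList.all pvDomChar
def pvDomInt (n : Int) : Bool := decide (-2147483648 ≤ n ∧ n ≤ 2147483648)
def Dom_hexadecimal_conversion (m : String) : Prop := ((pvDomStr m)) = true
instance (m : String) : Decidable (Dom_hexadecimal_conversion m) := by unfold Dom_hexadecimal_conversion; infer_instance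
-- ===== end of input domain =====

-- B converts every character to hex in one flat pass and then chunks string and hex list in one parallel loop,
-- inverting A's chunk-then-convert two-pass structure; same cost, alternative decomposition.

-- hex(n)[2:] for n ≥ 0 (lowercase hex digits, no prefix) — shared model of the Python builtin
def pyHex (n : Nat) : String := String.ofList (Nat.toDigits 16 n)

-- ===== PORT A =====
def hexadecimal_conversion (m : String) : List String × List (List String) × List String :=
  let small_chunks : List String :=
    (PySem.List.pyRange 0 (PySem.Str.len m) 3).foldl
      (fun acc x => acc ++ [PySem.Str.slice m (some x) (some (x + 3))]) []
  let res : List (List String) × List String :=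
    small_chunks.foldl
      (fun acc chunk =>
        let inner : String × List String :=
          chunk.toList.foldl
            (fun p ch =>
              let hex_decimal_value := pyHex ch.toNat
              (p.1 ++ hex_decimal_value, p.2 ++ [hex_decimal_value]))
            ("", [])
        (acc.1 ++ [inner.2], acc.2 ++ [inner.1]))
      ([], [])
  (small_chunks, res.1, res.2)

-- ===== PORT B =====
def hexadecimal_conversion_alt (m : String) : List String × List (List String) × List String :=
  let hexes : List String := m.toList.map (fun c => pyHex c.toNat)
  (PySem.List.pyRange 0 (PySem.Str.len m) 3).foldl
    (fun acc x =>
      let h := PySem.List.slice hexes (some x) (some (x + 3))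
      (acc.1 ++ [PySem.Str.slice m (some x) (some (x + 3))],
       acc.2.1 ++ [h],
       acc.2.2 ++ [PySem.Str.join "" h]))
    ([], [], [])

-- ===== PRECONDITION & SPEC =====
def Spec_hexadecimal_conversion (m : String) (out : List String × List (List String) × List String) : Prop := out = hexadecimal_conversion_alt m
instance (m : String) (out : List String × List (List String) × List String) : Decidable (Spec_hexadecimal_conversion m out) := by unfold Spec_hexadecimal_conversion; infer_instance

-- ===== CLAIM (what is proved, stated in full; the proofs are below) =====
def Claim_equal_hexadecimal_conversion : Prop := ∀ (m : String), Dom_hexadecimal_conversion m → Spec_hexadecimal_conversion m (hexadecimal_conversion m)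

-- ===== LEMMAS AND PROOFS =====

theorem foldl_snoc_eq_map {α β : Type} (f : α → β) (l : List α) (init : List β) :
    l.foldl (fun acc x => acc ++ [f x]) init = init ++ l.map f := by
  induction l generalizing init with
  | nil => simp
  | cons a t ih => simp [ih]

theorem foldl_pair_snoc {α β γ : Type} (g : α → β) (h : α → γ) (l : List α)
    (b : List β) (c : List γ) :
    l.foldl (fun acc x => (acc.1 ++ [g x], acc.2 ++ [h x])) (b, c)
      = (b ++ l.map g, c ++ l.map h) := by
  induction l generalizing b c with
  | nil => simp
  | cons a t ih => simp [ih]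

theorem foldl_triple_snoc {α β γ δ : Type} (f1 : α → β) (f2 : α → γ) (f3 : α → δ)
    (l : List α) (b : List β) (c : List γ) (d : List δ) :
    l.foldl (fun acc x => (acc.1 ++ [f1 x], acc.2.1 ++ [f2 x], acc.2.2 ++ [f3 x])) (b, c, d)
      = (b ++ l.map f1, c ++ l.map f2, d ++ l.map f3) := by
  induction l generalizing b c d with
  | nil => simp
  | cons a t ih => simp [ih]

theorem inner_fold_eq (l : List Char) (s : String) (acc : List String) :
    l.foldl
      (fun p ch =>
        let hex_decimal_value := pyHex ch.toNat
        (p.1 ++ hex_decimal_value, p.2 ++ [hex_decimal_value]))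
      (s, acc)
      = (s ++ String.ofList ((l.map (fun c => Nat.toDigits 16 c.toNat)).flatten),
         acc ++ l.map (fun c => pyHex c.toNat)) := by
  induction l generalizing s acc with
  | nil => simp
  | cons a t ih =>
      simp only [List.foldl_cons, ih, List.map_cons, List.flatten_cons]
      refine Prod.ext ?_ (by simp)
      simp [pyHex, String.ofList_append, ← String.toList_inj, String.toList_append]

theorem flatten_intersperse_nil {α : Type} (ls : List (List α)) :
    (ls.intersperse ([] : List α)).flatten = ls.flatten := by
  induction ls with
  | nil => simp
  | cons a t ih =>
      cases t with
      | nil => simp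
      | cons b u =>
          simp only [List.intersperse] at ih ⊢
          simp only [List.flatten_cons] at ih ⊢
          simp [ih]

theorem join_nil_eq_flatten (ls : List (List Char)) :
    PySem.Chars.join [] ls = ls.flatten := by
  simp [PySem.Chars.join, List.intercalate, flatten_intersperse_nil]

-- ===== VERDICT (by name: the statement is the Claim_ definition above) =====
theorem hexadecimal_conversion_spec : Claim_equal_hexadecimal_conversion := by
  intro m _
  unfold Spec_hexadecimal_conversion hexadecimal_conversion hexadecimal_conversion_alt
  simp only [foldl_snoc_eq_map, foldl_pair_snoc, foldl_triple_snoc, inner_fold_eq,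
    List.nil_append, List.map_map]
  have key : ∀ x : Int, x ∈ PySem.List.pyRange 0 (PySem.Str.len m) 3 →
      PySem.List.slice (m.toList.map (fun c => pyHex c.toNat)) (some x) (some (x + 3))
        = ((PySem.Str.slice m (some x) (some (x + 3))).toList).map (fun c => pyHex c.toNat) := by
    intro x hx
    have hx0 : 0 ≤ x := by
      have := (PySem.List.mem_pyRange_iff_of_pos (a := 0) (b := PySem.Str.len m) (s := 3)
        (by norm_num) x).mp hx
      omega
    have hx3 : (0:Int) ≤ x + 3 := by omega
    have hslice : (PySem.Str.slice m (some x) (some (x + 3))).toList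
        = (m.toList.drop x.toNat).take ((x+3).toNat - x.toNat) := by
      simp [PySem.Str.toList_slice, PySem.List.slice_toNat _ hx0 hx3]
    rw [hslice, PySem.List.slice_toNat _ hx0 hx3, List.map_take, List.map_drop]
  refine Prod.ext rfl (Prod.ext ?_ ?_)
  · apply List.map_congr_left
    intro x hx
    simpa [Function.comp_def] using (key x hx).symm
  · apply List.map_congr_left
    intro x hx
    rw [key x hx]
    simp [← String.toList_inj, PySem.Str.toList_join, join_nil_eq_flatten,
      List.map_map, Function.comp_def, pyHex, String.toList_ofList]
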